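-- pv_equiv track=rewrite | github.com/text2gene/text2gene2 | src/text2gene2/sources/europepmc.py | _attribute_hit
-- ===== SOURCE A (Python) =====
-- def _attribute_hit(title: str, abstract: str, search_forms: list[str],
--                    gene_synonyms: list[str]) -> str | None:
--     """
--     Post-hoc attribution: which search form most likely matched this result?
--
--     Checks title+abstract for each expanded form, returns the most specific
--     match. Prefers variant forms over gene-only matches.
--     """
--     text = f"{title} {abstract}".lower()
--
--     # Check variant forms (most specific first — these are ordered by specificity
--     # in ExpandedVariant.all_search_forms)
--     for form in search_forms:
--         if form.lower() in text:
--             # Find which gene synonym also appears for a complete attribution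
--             gene_match = None
--             for syn in gene_synonyms:
--                 if syn.lower() in text:
--                     gene_match = syn
--                     break
--             if gene_match:
--                 return f"{gene_match} + {form}"
--             return form
--
--     # If no specific variant form found, check gene synonyms
--     for syn in gene_synonyms:
--         if syn.lower() in text:
--             return f"{syn} (gene only)"
--
--     return None
-- ===== SOURCE B (Python) =====
-- def _attribute_hit(title: str, abstract: str, search_forms: list[str],
--                    gene_synonyms: list[str]) -> str | None:
--     """Single fused pass with accumulators: tag both lists, scan the tagged
--     concatenation once (early exit when both accumulators are set), then one
--     flat case analysis on the pair."""
--     text = f"{title} {abstract}".lower()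
--     form_hit = None
--     syn_hit = None
--     for is_form, cand in [(True, f) for f in search_forms] + \
--                          [(False, s) for s in gene_synonyms]:
--         hit = cand.lower() in text
--         if is_form and form_hit is None and hit:
--             form_hit = cand
--         elif (not is_form) and syn_hit is None and hit:
--             syn_hit = cand
--         if form_hit is not None and syn_hit is not None:
--             break
--     if form_hit is not None:
--         return f"{syn_hit} + {form_hit}" if syn_hit else form_hit
--     if syn_hit is not None:
--         return f"{syn_hit} (gene only)"
--     return None
-- ===== Notes on version B (the rewrite author's own statement) =====
-- stated objective: alternative
-- what changed: Replaces A's nested loop (inner synonym rescan per matching form) plus a separate fallback loop by one fused pass over the tagged concatenation of both lists that maintains two first-match accumulators with early exit, followed by a single flat case analysis on the accumulator pair.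
import Mathlib
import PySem

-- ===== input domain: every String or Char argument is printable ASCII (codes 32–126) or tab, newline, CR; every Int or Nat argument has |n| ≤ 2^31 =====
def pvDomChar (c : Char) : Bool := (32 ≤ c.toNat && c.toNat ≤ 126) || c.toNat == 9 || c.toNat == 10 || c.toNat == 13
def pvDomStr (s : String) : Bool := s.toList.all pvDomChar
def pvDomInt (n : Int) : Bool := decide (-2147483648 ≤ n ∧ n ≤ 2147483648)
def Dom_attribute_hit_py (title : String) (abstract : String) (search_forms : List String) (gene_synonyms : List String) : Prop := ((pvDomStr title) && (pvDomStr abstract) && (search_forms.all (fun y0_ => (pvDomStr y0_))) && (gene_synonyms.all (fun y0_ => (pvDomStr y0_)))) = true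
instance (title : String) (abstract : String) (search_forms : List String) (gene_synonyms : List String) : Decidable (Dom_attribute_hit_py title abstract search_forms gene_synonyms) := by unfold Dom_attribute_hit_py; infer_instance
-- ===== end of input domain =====

-- B replaces A's nested loop + separate fallback loop by one fused pass over the tagged
-- concatenation of both lists with two first-match accumulators and early exit, then a
-- single flat case analysis (objective: alternative decomposition; same cost).


-- ===== PORT A =====
-- inner loop: "for syn in gene_synonyms: if syn.lower() in text: gene_match = syn; break"
def pvAFindSyn (text : String) : List String → Option String
  | [] => none
  | syn :: rest =>
    if PySem.Str.isIn (PySem.Str.lower syn) text then some syn else pvAFindSyn text rest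

-- fallback loop: "for syn in gene_synonyms: if syn.lower() in text: return f'{syn} (gene only)'"
def pvAFallback (text : String) : List String → Option String
  | [] => none
  | syn :: rest =>
    if PySem.Str.isIn (PySem.Str.lower syn) text then some (syn ++ " (gene only)")
    else pvAFallback text rest

-- outer loop over search_forms; falls through to the fallback loop
def pvAOuter (text : String) (gene_synonyms : List String) : List String → Option String
  | [] => pvAFallback text gene_synonyms
  | form :: rest =>
    if PySem.Str.isIn (PySem.Str.lower form) text then
      match pvAFindSyn text gene_synonyms with
      | some g => if g ≠ "" then some (g ++ " + " ++ form) else some form  -- "if gene_match" is Python truthiness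
      | none => some form
    else pvAOuter text gene_synonyms rest

def attribute_hit_py (title : String) (abstract : String) (search_forms : List String) (gene_synonyms : List String) : Option String :=
  pvAOuter (PySem.Str.lower (title ++ " " ++ abstract)) gene_synonyms search_forms

-- ===== PORT B =====
-- the fused loop over the tagged list, two accumulators, early break when both are set
def pvBLoop (text : String) : List (Bool × String) → Option String → Option String → Option String × Option String
  | [], fh, sh => (fh, sh)
  | (isForm, cand) :: rest, fh, sh =>
    let hit := PySem.Str.isIn (PySem.Str.lower cand) text
    let fh' := if isForm && fh.isNone && hit then some cand else fh
    let sh' := if !isForm && sh.isNone && hit then some cand else sh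
    if fh'.isSome && sh'.isSome then (fh', sh') else pvBLoop text rest fh' sh'

def attribute_hit_py_alt (title : String) (abstract : String) (search_forms : List String) (gene_synonyms : List String) : Option String :=
  let text := PySem.Str.lower (title ++ " " ++ abstract)
  let tagged := search_forms.map (fun f => (true, f)) ++ gene_synonyms.map (fun s => (false, s))
  match pvBLoop text tagged none none with
  | (some form, some g) => if g ≠ "" then some (g ++ " + " ++ form) else some form  -- "if syn_hit" truthiness
  | (some form, none) => some form
  | (none, some g) => some (g ++ " (gene only)")
  | (none, none) => none

-- ===== PRECONDITION & SPEC =====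
def Spec_attribute_hit_py (title : String) (abstract : String) (search_forms : List String) (gene_synonyms : List String) (out : Option String) : Prop := out = attribute_hit_py_alt title abstract search_forms gene_synonyms
instance (title : String) (abstract : String) (search_forms : List String) (gene_synonyms : List String) (out : Option String) : Decidable (Spec_attribute_hit_py title abstract search_forms gene_synonyms out) := by unfold Spec_attribute_hit_py; infer_instance

-- ===== CLAIM (what is proved, stated in full; the proofs are below) =====
def Claim_equal_attribute_hit_py : Prop := ∀ (title : String) (abstract : String) (search_forms : List String) (gene_synonyms : List String), Dom_attribute_hit_py title abstract search_forms gene_synonyms → Spec_attribute_hit_py title abstract search_forms gene_synonyms (attribute_hit_py title abstract search_forms gene_synonyms)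

-- ===== LEMMAS AND PROOFS =====

-- A's inner break-loop computes the first matching synonym.
lemma pvAFindSyn_eq_find? (text : String) (syns : List String) :
    pvAFindSyn text syns = syns.find? (fun s => PySem.Str.isIn (PySem.Str.lower s) text) := by
  induction syns with
  | nil => rfl
  | cons s rest ih =>
    simp only [pvAFindSyn, List.find?_cons]
    split_ifs with h <;> simp_all

-- A's fallback loop is the first matching synonym, suffixed.
lemma pvAFallback_eq (text : String) (syns : List String) :
    pvAFallback text syns =
      (syns.find? (fun s => PySem.Str.isIn (PySem.Str.lower s) text)).map (fun g => g ++ " (gene only)") := by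
  induction syns with
  | nil => rfl
  | cons s rest ih =>
    simp only [pvAFallback, List.find?_cons]
    split_ifs with h <;> simp_all

-- Once the synonym accumulator is set and only synonym items remain, nothing changes.
lemma pvBLoop_syns_sat (text : String) (syns : List String) (g : String) :
    pvBLoop text (syns.map (fun s => (false, s))) none (some g) = (none, some g) := by
  induction syns with
  | nil => rfl
  | cons s rest ih => simpa [pvBLoop] using ih

-- Over the synonym segment, the loop records the first match and keeps fh.
lemma pvBLoop_syns (text : String) (syns : List String) (fh : Option String) :
    pvBLoop text (syns.map (fun s => (false, s))) fh none =
      (fh, syns.find? (fun s => PySem.Str.isIn (PySem.Str.lower s) text)) := by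
  induction syns generalizing fh with
  | nil => rfl
  | cons s rest ih =>
    simp only [List.map_cons, pvBLoop, List.find?_cons]
    by_cases h : PySem.Str.isIn (PySem.Str.lower s) text
    all_goals simp only [PySem.Str.isIn, PySem.Str.toList_lower] at h
    · cases fh <;> simp [h, pvBLoop_syns_sat]
    · cases fh <;> simp [h, ih]

-- Over the forms segment (sh still none, so no early exit), fh accumulates the first match.
lemma pvBLoop_forms (text : String) (forms : List String) (tail : List (Bool × String)) (fh : Option String) :
    pvBLoop text (forms.map (fun f => (true, f)) ++ tail) fh none =
      pvBLoop text tail (fh.or (forms.find? (fun f => PySem.Str.isIn (PySem.Str.lower f) text))) none := by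
  induction forms generalizing fh with
  | nil => cases fh <;> rfl
  | cons f rest ih =>
    simp only [List.map_cons, List.cons_append, pvBLoop, List.find?_cons]
    by_cases h : PySem.Str.isIn (PySem.Str.lower f) text
    all_goals simp only [PySem.Str.isIn, PySem.Str.toList_lower] at h
    · cases fh <;> simp [h, ih]
    · cases fh <;> simp [h, ih]

-- A's outer loop = the case analysis on the two first matches.
lemma pvAOuter_eq (text : String) (gs forms : List String) :
    pvAOuter text gs forms =
      match (forms.find? (fun f => PySem.Str.isIn (PySem.Str.lower f) text),
             gs.find? (fun s => PySem.Str.isIn (PySem.Str.lower s) text)) with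
      | (some form, some g) => if g ≠ "" then some (g ++ " + " ++ form) else some form
      | (some form, none) => some form
      | (none, some g) => some (g ++ " (gene only)")
      | (none, none) => none := by
  induction forms with
  | nil =>
    simp only [pvAOuter, List.find?_nil, pvAFallback_eq]
    cases gs.find? (fun s => PySem.Str.isIn (PySem.Str.lower s) text) <;> rfl
  | cons form rest ih =>
    simp only [pvAOuter]
    split_ifs with h
    · rw [List.find?_cons_of_pos (p := fun f => PySem.Str.isIn (PySem.Str.lower f) text) (l := rest) (h := h), pvAFindSyn_eq_find?]
      cases List.find? (fun s => PySem.Str.isIn (PySem.Str.lower s) text) gs <;> rfl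
    · rw [List.find?_cons_of_neg (p := fun f => PySem.Str.isIn (PySem.Str.lower f) text) (l := rest) (h := h)]; exact ih

-- ===== VERDICT (by name: the statement is the Claim_ definition above) =====
theorem attribute_hit_py_spec : Claim_equal_attribute_hit_py := by
  intro title abstract search_forms gene_synonyms _
  unfold Spec_attribute_hit_py attribute_hit_py attribute_hit_py_alt
  simp only [pvAOuter_eq, pvBLoop_forms, Option.none_or, pvBLoop_syns]
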